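-- pv_equiv track=rewrite | github.com/AtomicLeap/Data-Strutures-and-Algorithms | Leetcode Solutions/leetcode_1680.py | concatenate_binary
-- ===== SOURCE A (Python) =====
-- def concatenate_binary(n: int) -> int:
--     MOD = 10**9 + 7
--     result = 0
--     bit_len = 0
--
--     for i in range(1, n + 1):
--         # if i is a power of two, its bit-length increases by 1
--         if (i & (i - 1)) == 0:
--             bit_len += 1
--
--         result = ((result << bit_len) + i) % MOD
--
--     return result
-- ===== SOURCE B (Python) =====
-- def concatenate_binary(n: int) -> int:
--     MOD = 10**9 + 7
--     result = 0
--     p = 1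
--     # process back-to-front: the contribution of i is i * 2^(total bit length of i+1..n)
--     for i in range(n, 0, -1):
--         result = (result + i * p) % MOD
--         p = (p << i.bit_length()) % MOD
--     return result
-- ===== Notes on version B (the rewrite author's own statement) =====
-- stated objective: alternative
-- what changed: B replaces A's forward Horner-style shift-and-accumulate (with the power-of-two trick tracking bit length) by a backward pass that sums i times a maintained modular power-of-two weight, using i.bit_length() directly.
import Mathlib
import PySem

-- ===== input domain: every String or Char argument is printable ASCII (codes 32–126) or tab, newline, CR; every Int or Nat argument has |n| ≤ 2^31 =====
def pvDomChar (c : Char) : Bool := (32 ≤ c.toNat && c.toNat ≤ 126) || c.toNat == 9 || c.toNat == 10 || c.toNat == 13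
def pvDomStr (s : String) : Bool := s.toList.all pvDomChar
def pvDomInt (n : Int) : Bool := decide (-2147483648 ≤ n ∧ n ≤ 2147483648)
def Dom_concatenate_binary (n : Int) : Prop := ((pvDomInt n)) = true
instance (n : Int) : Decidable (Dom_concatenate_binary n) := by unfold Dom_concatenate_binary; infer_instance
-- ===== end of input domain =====

-- B builds the result back-to-front (sum of i times a maintained modular power-of-two weight,
-- using i.bit_length()) instead of A's forward shift-and-accumulate with the power-of-two trick.

-- ===== PORT A =====
def concatenate_binary (n : Int) : Int :=
  ((PySem.List.pyRange 1 (n + 1) 1).foldl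
    (fun (st : Int × Nat) i =>
      let bl : Nat := if PySem.Int.band i (i - 1) = 0 then st.2 + 1 else st.2
      (PySem.Int.mod (st.1 <<< bl + i) (10 ^ 9 + 7), bl))
    (0, 0)).1

-- ===== PORT B =====
def concatenate_binary_alt (n : Int) : Int :=
  ((PySem.List.pyRange n 0 (-1)).foldl
    (fun (st : Int × Int) i =>
      (PySem.Int.mod (st.1 + i * st.2) (10 ^ 9 + 7),
       PySem.Int.mod (st.2 <<< PySem.Int.bitLength i) (10 ^ 9 + 7)))
    (0, 1)).1

-- ===== PRECONDITION & SPEC =====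
def Spec_concatenate_binary (n : Int) (out : Int) : Prop := out = concatenate_binary_alt n
instance (n : Int) (out : Int) : Decidable (Spec_concatenate_binary n out) := by unfold Spec_concatenate_binary; infer_instance

-- ===== CLAIM (what is proved, stated in full; the proofs are below) =====
def Claim_equal_concatenate_binary : Prop := ∀ (n : Int), Dom_concatenate_binary n → Spec_concatenate_binary n (concatenate_binary n)

-- ===== LEMMAS AND PROOFS =====

-- bit length of a natural number, as the ports see it
def pvL (m : Nat) : Nat := PySem.Int.bitLength (m : Int)

-- exact (unreduced) value of the concatenation of the binary representations of 1..k
def pvC : Nat → Nat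
  | 0 => 0
  | k + 1 => pvC k * 2 ^ pvL (k + 1) + (k + 1)

-- total bit length of 1..k
def pvT : Nat → Nat
  | 0 => 0
  | k + 1 => pvL (k + 1) + pvT k

lemma pvL_lt (m : Nat) : m < 2 ^ pvL m := by
  have h := PySem.Int.lt_two_pow_bitLength (m : Int)
  simpa [pvL] using h

lemma pvL_le (m : Nat) (hm : 1 ≤ m) : 2 ^ (pvL m - 1) ≤ m := by
  have h := PySem.Int.two_pow_bitLength_le (m : Int) (by exact_mod_cast Nat.one_le_iff_ne_zero.mp hm)
  simpa [pvL] using h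

lemma pvL_pos (m : Nat) (hm : 1 ≤ m) : 1 ≤ pvL m := by
  have h := pvL_lt m
  by_contra hc
  have h0 : pvL m = 0 := by omega
  rw [h0] at h
  simp at h
  omega

lemma pvL_eq_of_bounds (m h : Nat) (h1 : 2 ^ h ≤ m) (h2 : m < 2 ^ (h + 1)) : pvL m = h + 1 := by
  have hm : 1 ≤ m := le_trans (Nat.one_le_two_pow) h1
  have hlt := pvL_lt m
  have hle := pvL_le m hm
  have hp := pvL_pos m hm
  -- h < pvL m from 2^h ≤ m < 2^(pvL m); pvL m - 1 ≤ h from 2^(pvL m -1) ≤ m < 2^(h+1)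
  have a1 : h < pvL m := by
    by_contra hc
    have : 2 ^ pvL m ≤ 2 ^ h := Nat.pow_le_pow_right (by norm_num) (by omega)
    omega
  have a2 : pvL m - 1 < h + 1 := by
    by_contra hc
    have : 2 ^ (h + 1) ≤ 2 ^ (pvL m - 1) := Nat.pow_le_pow_right (by norm_num) (by omega)
    omega
  omega

-- the power-of-two trick: m & (m-1) == 0 iff m is (the) power of two 2^(pvL m - 1)
lemma land_pred_eq_zero_iff (m : Nat) (hm : 1 ≤ m) :
    (m &&& (m - 1) = 0) ↔ m = 2 ^ (pvL m - 1) := by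
  have hle := pvL_le m hm
  have hlt := pvL_lt m
  have hp := pvL_pos m hm
  have hub : m < 2 ^ ((pvL m - 1) + 1) := by
    have he : (pvL m - 1) + 1 = pvL m := by omega
    rw [he]; exact hlt
  constructor
  · intro hz
    by_contra hne
    have hgt : 2 ^ (pvL m - 1) < m := lt_of_le_of_ne hle (fun e => hne e.symm)
    have t1 : m.testBit (pvL m - 1) = true :=
      Nat.testBit_of_two_pow_le_and_two_pow_add_one_gt (le_of_lt hgt) hub
    have t2 : (m - 1).testBit (pvL m - 1) = true :=
      Nat.testBit_of_two_pow_le_and_two_pow_add_one_gt (by omega) (by omega)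
    have hb : (m &&& (m - 1)).testBit (pvL m - 1) = true := by
      rw [Nat.testBit_land, t1, t2]; rfl
    rw [hz] at hb
    simp at hb
  · intro he
    rw [he, Nat.two_pow_and, Nat.testBit_two_pow_sub_one]
    simp

lemma pvL_succ_step (k : Nat) :
    pvL (k + 1) = pvL k + (if (k + 1) &&& k = 0 then 1 else 0) := by
  have hm : 1 ≤ k + 1 := by omega
  have hp := pvL_pos (k + 1) hm
  have hle := pvL_le (k + 1) hm
  have hlt := pvL_lt (k + 1)
  have hub : k + 1 < 2 ^ ((pvL (k + 1) - 1) + 1) := by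
    have he : (pvL (k + 1) - 1) + 1 = pvL (k + 1) := by omega
    rw [he]; exact hlt
  have hiff := land_pred_eq_zero_iff (k + 1) hm
  simp only [Nat.add_sub_cancel] at hiff
  by_cases hc : (k + 1) &&& k = 0
  · -- k+1 = 2^(pvL (k+1) - 1), so pvL k = pvL (k+1) - 1
    have he : k + 1 = 2 ^ (pvL (k + 1) - 1) := hiff.mp hc
    have hk : pvL k = pvL (k + 1) - 1 := by
      rcases Nat.eq_zero_or_pos (pvL (k + 1) - 1) with h0 | hpos
      · have hk0 : k = 0 := by rw [h0] at he; omega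
        subst hk0
        rw [h0]
        decide
      · have hmul : 2 ^ ((pvL (k + 1) - 1) - 1) * 2 = 2 ^ (pvL (k + 1) - 1) := by
          rw [← pow_succ]; congr 1; omega
        have h1p : 1 ≤ 2 ^ ((pvL (k + 1) - 1) - 1) := Nat.one_le_two_pow
        have b1 : 2 ^ ((pvL (k + 1) - 1) - 1) ≤ k := by omega
        have b2 : k < 2 ^ (((pvL (k + 1) - 1) - 1) + 1) := by
          have heq : ((pvL (k + 1) - 1) - 1) + 1 = pvL (k + 1) - 1 := by omega
          rw [heq]; omega
        have := pvL_eq_of_bounds k ((pvL (k + 1) - 1) - 1) b1 b2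
        omega
    simp only [hc, if_true]
    omega
  · -- k+1 is not a power of two
    have hne : k + 1 ≠ 2 ^ (pvL (k + 1) - 1) := fun e => hc (hiff.mpr e)
    have hgt : 2 ^ (pvL (k + 1) - 1) < k + 1 := lt_of_le_of_ne hle (Ne.symm hne)
    have hk : pvL k = (pvL (k + 1) - 1) + 1 := pvL_eq_of_bounds k (pvL (k + 1) - 1) (by omega) (by omega)
    simp only [hc, if_false]
    omega

lemma pvM_pos : (0 : Int) < 10 ^ 9 + 7 := by norm_num

lemma emod_absorb (a b c M : Int) : (a % M * b + c) % M = (a * b + c) % M := by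
  conv_rhs => rw [Int.add_emod, Int.mul_emod]
  conv_lhs => rw [Int.add_emod, Int.mul_emod, Int.emod_emod_of_dvd a dvd_rfl]

lemma foldA (k : Nat) :
    ((PySem.List.pyRange 1 ((k : Int) + 1) 1).foldl
      (fun (st : Int × Nat) i =>
        let bl : Nat := if PySem.Int.band i (i - 1) = 0 then st.2 + 1 else st.2
        (PySem.Int.mod (st.1 <<< bl + i) (10 ^ 9 + 7), bl))
      (0, 0)) = (((pvC k : Int)) % (10 ^ 9 + 7), pvL k) := by
  induction k with
  | zero =>
    rw [PySem.List.pyRange_one_eq_nil (by norm_num)]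
    simp only [List.foldl_nil]
    have h0 : pvC 0 = 0 := rfl
    have h1 : pvL 0 = 0 := by decide
    rw [h0, h1]
    decide
  | succ k ih =>
    have hsplit : PySem.List.pyRange 1 (((k + 1 : Nat) : Int) + 1) 1
        = PySem.List.pyRange 1 ((k : Int) + 1) 1 ++ [(k : Int) + 1] := by
      have he : (((k + 1 : Nat) : Int) + 1) = ((k : Int) + 1) + 1 := by push_cast; ring
      rw [he, PySem.List.pyRange_one_succ_right (by omega)]
    rw [hsplit, List.foldl_append, ih]
    simp only [List.foldl_cons, List.foldl_nil]
    have hband : PySem.Int.band ((k : Int) + 1) (((k : Int) + 1) - 1)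
        = (((k + 1) &&& k : Nat) : Int) := by
      rw [show ((k : Int) + 1) = ((k + 1 : Nat) : Int) from by push_cast; ring]
      rw [show (((k + 1 : Nat) : Int) - 1) = ((k : Nat) : Int) from by push_cast; ring]
      rw [PySem.Int.band_natCast]
    have hbl : (if PySem.Int.band ((k : Int) + 1) (((k : Int) + 1) - 1) = 0
        then pvL k + 1 else pvL k) = pvL (k + 1) := by
      rw [hband, pvL_succ_step k]
      by_cases hc : (k + 1) &&& k = 0 <;> simp [hc]
    simp only [hbl, Prod.mk.injEq]
    refine ⟨?_, trivial⟩
    rw [PySem.Int.mod_eq_emod_of_pos pvM_pos, Int.shiftLeft_eq, emod_absorb]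
    have hval : ((pvC k : Int)) * 2 ^ pvL (k + 1) + ((k : Int) + 1) = ((pvC (k + 1) : Int)) := by
      show ((pvC k : Int)) * 2 ^ pvL (k + 1) + ((k : Int) + 1)
          = ((pvC k * 2 ^ pvL (k + 1) + (k + 1) : Nat) : Int)
      push_cast
      ring
    rw [hval]

lemma foldB (k : Nat) : ∀ (r p : Int),
    ((PySem.List.pyRange (k : Int) 0 (-1)).foldl
      (fun (st : Int × Int) i =>
        (PySem.Int.mod (st.1 + i * st.2) (10 ^ 9 + 7),
         PySem.Int.mod (st.2 <<< PySem.Int.bitLength i) (10 ^ 9 + 7)))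
      (r % (10 ^ 9 + 7), p % (10 ^ 9 + 7)))
    = ((r + p * (pvC k : Int)) % (10 ^ 9 + 7), (p * 2 ^ pvT k) % (10 ^ 9 + 7)) := by
  induction k with
  | zero =>
    intro r p
    rw [PySem.List.pyRange_neg_one_eq_nil (by norm_num)]
    simp [pvC, pvT]
  | succ k ih =>
    intro r p
    have hpos : (0 : Int) < ((k + 1 : Nat) : Int) := by positivity
    rw [PySem.List.pyRange_neg_one_cons hpos]
    have hpred : (((k + 1 : Nat) : Int) - 1) = ((k : Nat) : Int) := by push_cast; ring
    rw [List.foldl_cons, hpred]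
    have hstep1 : PySem.Int.mod (r % (10 ^ 9 + 7) + ((k + 1 : Nat) : Int) * (p % (10 ^ 9 + 7))) (10 ^ 9 + 7)
        = (r + ((k + 1 : Nat) : Int) * p) % (10 ^ 9 + 7) := by
      rw [PySem.Int.mod_eq_emod_of_pos pvM_pos]
      conv_rhs => rw [Int.add_emod, Int.mul_emod]
      conv_lhs => rw [Int.add_emod, Int.mul_emod,
        Int.emod_emod_of_dvd r dvd_rfl, Int.emod_emod_of_dvd p dvd_rfl]
    have hstep2 : PySem.Int.mod ((p % (10 ^ 9 + 7)) <<< PySem.Int.bitLength ((k + 1 : Nat) : Int)) (10 ^ 9 + 7)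
        = (p * 2 ^ pvL (k + 1)) % (10 ^ 9 + 7) := by
      rw [PySem.Int.mod_eq_emod_of_pos pvM_pos, Int.shiftLeft_eq]
      rw [show PySem.Int.bitLength ((k + 1 : Nat) : Int) = pvL (k + 1) from rfl]
      rw [Int.mul_emod, Int.emod_emod_of_dvd p dvd_rfl, ← Int.mul_emod]
    rw [hstep1, hstep2, ih (r + ((k + 1 : Nat) : Int) * p) (p * 2 ^ pvL (k + 1))]
    simp only [Prod.mk.injEq]
    constructor
    · congr 1
      show r + ((k + 1 : Nat) : Int) * p + p * 2 ^ pvL (k + 1) * ((pvC k : Int))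
          = r + p * ((pvC (k + 1) : Int))
      show r + ((k + 1 : Nat) : Int) * p + p * 2 ^ pvL (k + 1) * ((pvC k : Int))
          = r + p * ((pvC k * 2 ^ pvL (k + 1) + (k + 1) : Nat) : Int)
      push_cast
      ring
    · congr 1
      show p * 2 ^ pvL (k + 1) * 2 ^ pvT k = p * 2 ^ pvT (k + 1)
      show p * 2 ^ pvL (k + 1) * 2 ^ pvT k = p * 2 ^ (pvL (k + 1) + pvT k)
      rw [pow_add]
      ring

-- ===== VERDICT (by name: the statement is the Claim_ definition above) =====
theorem concatenate_binary_spec : Claim_equal_concatenate_binary := by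
  intro n _
  show concatenate_binary n = concatenate_binary_alt n
  by_cases hn : n ≤ 0
  · unfold concatenate_binary concatenate_binary_alt
    rw [PySem.List.pyRange_one_eq_nil (by omega), PySem.List.pyRange_neg_one_eq_nil hn]
    rfl
  · have hn' : 0 ≤ n := by omega
    obtain ⟨k, rfl⟩ : ∃ k : Nat, n = (k : Int) := ⟨n.toNat, (Int.toNat_of_nonneg hn').symm⟩
    unfold concatenate_binary concatenate_binary_alt
    rw [foldA k]
    have h01 : ((0 : Int), (1 : Int)) = ((0 : Int) % (10 ^ 9 + 7), (1 : Int) % (10 ^ 9 + 7)) := by decide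
    rw [h01, foldB k 0 1]
    simp
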